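-- pv_equiv track=rewrite | github.com/Quantador/curriculum-learning-using-attention | router2.py | chunk_concat
-- ===== SOURCE A (Python) =====
-- def chunk_concat(examples, block_size: int):
--     ids = [tok for seq in examples["input_ids"] for tok in seq]
--     total_len = (len(ids) // block_size) * block_size
--     ids = ids[:total_len]
--     chunks = [ids[i:i+block_size] for i in range(0, total_len, block_size)]
--     return {
--         "input_ids": chunks,
--         "labels": chunks.copy(),
--         "attention_mask": [[1]*block_size]*len(chunks)
--     }
-- ===== SOURCE B (Python) =====
-- def chunk_concat(examples, block_size: int):
--     # single streaming pass: accumulate tokens into a buffer, emit a chunk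
--     # whenever the buffer reaches block_size (trailing partial buffer dropped)
--     chunks = []
--     buf = []
--     for seq in examples["input_ids"]:
--         for tok in seq:
--             buf.append(tok)
--             if len(buf) == block_size:
--                 chunks.append(buf)
--                 buf = []
--     return {
--         "input_ids": chunks,
--         "labels": chunks.copy(),
--         "attention_mask": [[1] * block_size] * len(chunks)
--     }
-- ===== Notes on version B (the rewrite author's own statement) =====
-- stated objective: alternative
-- what changed: B replaces A's flatten-then-slice pipeline (build the whole flattened token list, truncate via floor division, then slice out blocks by index ranges) with a single streaming pass that appends tokens to a running buffer and emits the buffer as a chunk each time it reaches block_size.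
import Mathlib
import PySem

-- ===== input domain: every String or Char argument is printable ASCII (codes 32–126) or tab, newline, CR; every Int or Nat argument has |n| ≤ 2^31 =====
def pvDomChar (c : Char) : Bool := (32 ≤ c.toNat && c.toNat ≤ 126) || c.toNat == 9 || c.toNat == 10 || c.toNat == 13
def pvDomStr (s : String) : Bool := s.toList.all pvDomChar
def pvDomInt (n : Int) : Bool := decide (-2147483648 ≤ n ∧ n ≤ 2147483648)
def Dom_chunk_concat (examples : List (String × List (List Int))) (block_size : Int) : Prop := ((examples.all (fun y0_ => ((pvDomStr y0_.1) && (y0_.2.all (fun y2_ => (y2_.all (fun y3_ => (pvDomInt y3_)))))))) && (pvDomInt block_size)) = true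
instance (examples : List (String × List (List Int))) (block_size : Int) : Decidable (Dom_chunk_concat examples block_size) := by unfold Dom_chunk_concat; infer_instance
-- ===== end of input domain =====

-- B re-implements A's flatten-then-slice chunking as a single streaming pass
-- (buffer filled token by token, flushed at block_size); return values only.

-- ===== PORT A =====
-- literal port of A: flatten, truncate to a multiple of block_size, slice blocks
def chunk_concat (examples : List (String × List (List Int))) (block_size : Int) : List (String × List (List Int)) :=
  let ids := ((examples.lookup "input_ids").getD []).flatten
  let total_len := PySem.Int.floordiv (ids.length : Int) block_size * block_size
  let ids2 := PySem.List.slice ids none (some total_len)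
  let chunks := (PySem.List.pyRange 0 total_len block_size).map
      (fun i => PySem.List.slice ids2 (some i) (some (i + block_size)))
  [("input_ids", chunks), ("labels", chunks),
   ("attention_mask", List.replicate chunks.length (List.replicate block_size.toNat (1 : Int)))]

-- ===== PORT B =====
-- one token step of B's streaming loop: state = (emitted chunks, current buffer)
def chunkStep (block_size : Int) (st : List (List Int) × List Int) (tok : Int) : List (List Int) × List Int :=
  let buf := st.2 ++ [tok]
  if (buf.length : Int) = block_size then (st.1 ++ [buf], []) else (st.1, buf)

def chunk_concat_alt (examples : List (String × List (List Int))) (block_size : Int) : List (String × List (List Int)) :=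
  let st := ((examples.lookup "input_ids").getD []).foldl
      (fun st seq => seq.foldl (chunkStep block_size) st) (([], []) : List (List Int) × List Int)
  let chunks := st.1
  [("input_ids", chunks), ("labels", chunks),
   ("attention_mask", List.replicate chunks.length (List.replicate block_size.toNat (1 : Int)))]

-- ===== PRECONDITION & SPEC =====
-- Pre_ excludes exactly the inputs where A raises: a missing "input_ids" key
-- (KeyError) and block_size = 0 (ZeroDivisionError).
def Pre_chunk_concat (examples : List (String × List (List Int))) (block_size : Int) : Prop :=
  (examples.lookup "input_ids").isSome = true ∧ block_size ≠ 0
instance (examples : List (String × List (List Int))) (block_size : Int) : Decidable (Pre_chunk_concat examples block_size) := by unfold Pre_chunk_concat; infer_instance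

def pvWitness_chunk_concat : (List (String × List (List Int))) × Int := ([("input_ids", [[1, 2], [3]])], 2)

def Spec_chunk_concat (examples : List (String × List (List Int))) (block_size : Int) (out : List (String × List (List Int))) : Prop := out = chunk_concat_alt examples block_size
instance (examples : List (String × List (List Int))) (block_size : Int) (out : List (String × List (List Int))) : Decidable (Spec_chunk_concat examples block_size out) := by unfold Spec_chunk_concat; infer_instance

-- ===== CLAIM (what is proved, stated in full; the proofs are below) =====
def Claim_equal_chunk_concat : Prop := ∀ (examples : List (String × List (List Int))) (block_size : Int), Dom_chunk_concat examples block_size → Pre_chunk_concat examples block_size → Spec_chunk_concat examples block_size (chunk_concat examples block_size)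

-- ===== LEMMAS AND PROOFS =====

-- reference chunking: q full blocks of k tokens taken from the front
def chunksOf (k : Nat) : Nat → List Int → List (List Int)
  | 0, _ => []
  | q + 1, l => l.take k :: chunksOf k q (l.drop k)

lemma stream_neg (b : Int) (hb : b < 0) (l : List Int) : ∀ (cs : List (List Int)) (buf : List Int),
    (l.foldl (chunkStep b) (cs, buf)).1 = cs := by
  induction l with
  | nil => intro cs buf; rfl
  | cons t l ih =>
    intro cs buf
    simp only [List.foldl_cons, chunkStep]
    rw [if_neg (by simp; omega)]
    exact ih cs (buf ++ [t])

lemma stream_pos (k : Nat) (hk : 0 < k) (l : List Int) : ∀ (cs : List (List Int)) (buf : List Int), buf.length < k →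
    (l.foldl (chunkStep (k : Int)) (cs, buf)).1
      = cs ++ chunksOf k ((buf.length + l.length) / k) (buf ++ l) := by
  induction l with
  | nil =>
    intro cs buf hbuf
    simp [Nat.div_eq_of_lt hbuf, chunksOf]
  | cons t l ih =>
    intro cs buf hbuf
    simp only [List.foldl_cons, chunkStep]
    by_cases h : buf.length + 1 = k
    · rw [if_pos (by simp; omega)]
      rw [ih (cs ++ [buf ++ [t]]) [] hk]
      have hlen : (buf ++ [t]).length = k := by simp; omega
      have h1 : buf.length + (t :: l).length = l.length + k := by simp; omega
      have hc : chunksOf k (l.length / k + 1) ((buf ++ [t]) ++ l)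
          = (buf ++ [t]) :: chunksOf k (l.length / k) l := by
        simp only [chunksOf]
        rw [List.take_left' hlen, List.drop_left' hlen]
      rw [h1, show buf ++ t :: l = (buf ++ [t]) ++ l by simp, Nat.add_div_right _ hk, hc]
      simp
    · rw [if_neg (by simp; omega)]
      rw [ih cs (buf ++ [t]) (by simp; omega)]
      have h1 : (buf ++ [t]).length + l.length = buf.length + (t :: l).length := by simp; omega
      have h2 : (buf ++ [t]) ++ l = buf ++ t :: l := by simp
      rw [h1, h2]

lemma chunksA (k : Nat) : ∀ (q : Nat) (l : List Int),
    (List.range q).map (fun j => ((l.take (q * k)).drop (j * k)).take k) = chunksOf k q l := by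
  intro q
  induction q with
  | zero => intro l; simp [chunksOf]
  | succ q ih =>
    intro l
    rw [List.range_succ_eq_map, List.map_cons, List.map_map]
    have htail : ∀ j ∈ List.range q,
        ((fun j => ((l.take ((q + 1) * k)).drop (j * k)).take k) ∘ Nat.succ) j
          = (fun j => (((l.drop k).take (q * k)).drop (j * k)).take k) j := by
      intro j _
      simp only [Function.comp]
      rw [List.drop_take, List.take_take, List.drop_take, List.drop_drop, List.take_take]
      congr 1
      · have a1 : (q + 1) * k = q * k + k := by ring
        have a2 : j.succ * k = j * k + k := by rw [Nat.succ_mul]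
        omega
      · congr 1
        rw [Nat.succ_mul]
        ring
    rw [List.map_congr_left htail, ih (l.drop k)]
    simp [chunksOf]
    rw [List.take_take, Nat.min_eq_left (by nlinarith : k ≤ (q + 1) * k)]

lemma pyRange_mul (k q : Nat) (hk : 0 < k) :
    PySem.List.pyRange 0 ((q : Int) * (k : Int)) (k : Int)
      = (List.range q).map (fun (j : Nat) => (k : Int) * (j : Int)) := by
  rw [PySem.List.pyRange_of_pos _ _ (by exact_mod_cast hk : (0 : Int) < (k : Int))]
  rcases Nat.eq_zero_or_pos q with hq | hq
  · subst hq; simp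
  · rw [if_pos (by positivity : (0 : Int) < (q : Int) * (k : Int))]
    have hcount : (((q : Int) * (k : Int) - 0 + (k : Int) - 1) / (k : Int)).toNat = q := by
      have h1 : (q : Int) * (k : Int) - 0 + (k : Int) - 1 = ((q * k + (k - 1) : Nat) : Int) := by
        push_cast [hk]
        ring
      rw [h1, ← Int.natCast_ediv]
      have h2 : (q * k + (k - 1)) / k = q := by
        rw [mul_comm q k, Nat.mul_add_div hk, Nat.div_eq_of_lt (by omega)]
        omega
      simp [h2]
    rw [hcount]
    exact List.map_congr_left (fun j _ => by ring)

lemma floordiv_cast_neg_nonpos (n : Nat) (b : Int) (hb : b < 0) : PySem.Int.floordiv (n : Int) b ≤ 0 := by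
  unfold PySem.Int.floordiv
  cases b with
  | ofNat m => simp [Int.ofNat_eq_natCast] at hb; omega
  | negSucc k =>
    cases n with
    | zero => simp
    | succ m =>
      show Int.fdiv (Int.ofNat (m + 1)) (Int.negSucc k) ≤ 0
      show Int.negSucc (m / k.succ) ≤ 0
      exact (Int.negSucc_lt_zero _).le

lemma chunks_eq (ids : List Int) (b : Int) (hb : b ≠ 0) :
    (PySem.List.pyRange 0 (PySem.Int.floordiv (ids.length : Int) b * b) b).map
      (fun i => PySem.List.slice (PySem.List.slice ids none (some (PySem.Int.floordiv (ids.length : Int) b * b))) (some i) (some (i + b)))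
    = (ids.foldl (chunkStep b) (([], []) : List (List Int) × List Int)).1 := by
  rcases lt_or_gt_of_ne hb with hneg | hpos
  · -- negative block size: both sides are empty
    rw [stream_neg b hneg ids [] []]
    have hq : PySem.Int.floordiv (ids.length : Int) b ≤ 0 :=
      floordiv_cast_neg_nonpos ids.length b hneg
    have htot : 0 ≤ PySem.Int.floordiv (ids.length : Int) b * b := by nlinarith
    have : PySem.List.pyRange 0 (PySem.Int.floordiv (ids.length : Int) b * b) b = [] := by
      simp only [PySem.List.pyRange, if_neg hb, if_neg (not_lt.2 hneg.le),
        if_neg (not_lt.2 htot), List.range_zero, List.map_nil]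
    rw [this, List.map_nil]
  · -- positive block size
    obtain ⟨k, rfl⟩ : ∃ k : Nat, b = (k : Int) := ⟨b.toNat, (Int.toNat_of_nonneg hpos.le).symm⟩
    have hk : 0 < k := by exact_mod_cast hpos
    rw [PySem.Int.floordiv_natCast]
    set q := ids.length / k with hqdef
    have hcast : ((q : Int)) * (k : Int) = ((q * k : Nat) : Int) := by push_cast; ring
    rw [pyRange_mul k q hk, List.map_map, hcast, PySem.List.slice_to_natCast]
    have hmap : ∀ j ∈ List.range q,
        ((fun i => PySem.List.slice (ids.take (q * k)) (some i) (some (i + (k : Int)))) ∘ (fun (j : Nat) => (k : Int) * (j : Int))) j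
          = (fun j => ((ids.take (q * k)).drop (j * k)).take k) j := by
      intro j _
      simp only [Function.comp]
      have e : (k : Int) * (j : Int) = ((j * k : Nat) : Int) := by push_cast; ring
      rw [e, PySem.List.slice_natCast_add]
    rw [List.map_congr_left hmap, chunksA k q ids,
      stream_pos k hk ids [] [] hk]
    simp [hqdef]

-- ===== VERDICT (by name: the statement is the Claim_ definition above) =====
theorem chunk_concat_spec : Claim_equal_chunk_concat := by
  intro examples block_size _ hpre
  obtain ⟨_, hb⟩ := hpre
  unfold Spec_chunk_concat
  simp only [chunk_concat, chunk_concat_alt]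
  rw [show (((examples.lookup "input_ids").getD []).foldl
        (fun st seq => seq.foldl (chunkStep block_size) st) (([], []) : List (List Int) × List Int))
      = (((examples.lookup "input_ids").getD []).flatten.foldl (chunkStep block_size)
          (([], []) : List (List Int) × List Int)) from List.foldl_flatten.symm]
  rw [← chunks_eq _ block_size hb]
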